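-- pv_equiv track=rewrite | github.com/marawansalaheldeen/CodeForces | GoodPrefixes.py | count_good_prefixes
-- ===== SOURCE A (Python) =====
-- def count_good_prefixes(t, test_cases):
--     results = []
--
--     for case in test_cases:
--         n, a = case
--         total_sum = 0
--         max_element = 0
--         good_count = 0
--
--         for i in range(n):
--             total_sum += a[i]
--             max_element = max(max_element, a[i])
--             if total_sum - max_element == max_element:
--                 good_count += 1
--
--         results.append(good_count)
--
--     return results
-- ===== SOURCE B (Python) =====
-- def _segments(xs, s, m):
--     # Count good prefixes by maximal constant-max segments: a record xs[0] opens
--     # a segment with max m2 = max(m, xs[0]) lasting while elements stay <= m2;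
--     # within it the prefix max is constant, so good prefixes are exactly the
--     # prefix sums equal to 2*m2, counted with list.count.
--     good = 0
--     while xs:
--         m2 = max(m, xs[0])
--         k = 1
--         while k < len(xs) and xs[k] <= m2:
--             k += 1
--         seg = xs[:k]
--         ps = []
--         for v in seg:
--             s += v
--             ps.append(s)
--         good += ps.count(2 * m2)
--         m = m2
--         xs = xs[k:]
--     return good
--
-- def count_good_prefixes(t, test_cases):
--     return [_segments(list(a[:max(n, 0)]), 0, 0) for n, a in test_cases]
-- ===== Notes on version B (the rewrite author's own statement) =====
-- stated objective: alternative
-- what changed: Replaces the fused per-element loop (running sum/max with an inline goodness test) by a segment decomposition: the array is consumed in maximal segments of constant prefix max m2 (delimited by running-max records), and within each segment good prefixes are counted as occurrences of 2*m2 among its prefix sums via list.count.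
import Mathlib
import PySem

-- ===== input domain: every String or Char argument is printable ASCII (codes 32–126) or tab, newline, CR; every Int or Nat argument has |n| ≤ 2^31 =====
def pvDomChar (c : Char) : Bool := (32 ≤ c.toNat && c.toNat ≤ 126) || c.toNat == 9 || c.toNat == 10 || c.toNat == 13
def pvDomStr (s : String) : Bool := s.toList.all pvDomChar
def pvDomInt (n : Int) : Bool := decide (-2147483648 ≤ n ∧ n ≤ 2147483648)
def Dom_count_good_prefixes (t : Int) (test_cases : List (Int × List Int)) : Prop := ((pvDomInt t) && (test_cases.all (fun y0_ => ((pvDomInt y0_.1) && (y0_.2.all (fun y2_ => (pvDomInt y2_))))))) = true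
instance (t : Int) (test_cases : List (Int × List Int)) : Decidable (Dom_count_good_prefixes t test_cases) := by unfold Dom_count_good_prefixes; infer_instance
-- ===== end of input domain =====

-- B replaces A's fused per-element loop by a segment decomposition: the array is consumed
-- in maximal segments of constant prefix max m2 (delimited by running-max records), counting
-- occurrences of 2*m2 among each segment's prefix sums.

-- ===== PORT A =====
-- fused loop: state (total_sum, max_element, good_count); a[i] in range under Pre_
def count_good_prefixes (t : Int) (test_cases : List (Int × List Int)) : List Int :=
  test_cases.foldl (fun results case =>
    let n := case.1
    let a := case.2
    let st := (PySem.List.pyRange 0 n 1).foldl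
      (fun (st : Int × Int × Int) i =>
        let x := PySem.List.pyGetD a i 0
        let s := st.1 + x
        let m := max st.2.1 x
        (s, m, st.2.2 + if s - m = m then 1 else 0)) (0, 0, 0)
    results ++ [st.2.2]) []

-- ===== PORT B =====
-- list(accumulate(seg, initial=s))[1:] : running sums with carry s
def pvAccAdd (s : Int) : List Int → List Int
  | [] => []
  | x :: xs => (s + x) :: pvAccAdd (s + x) xs

-- _segments of Source B, the 'while xs' loop with state (good, s, m, xs): the inner index
-- scan computes seg = xs[:k] = x :: rest.takeWhile (· ≤ m2) (xs[0] ≤ m2 always) and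
-- xs[k:] = rest.drop tw.length; after the for loop over seg, s has become s + seg.sum.
def pvSegments (good s m : Int) : List Int → Int
  | [] => good
  | x :: rest =>
    let m2 := max m x
    let tw := rest.takeWhile (fun y => decide (y ≤ m2))
    let seg := x :: tw
    let ps := pvAccAdd s seg
    pvSegments (good + (ps.count (2 * m2) : Int)) (s + seg.sum) m2 (rest.drop tw.length)
termination_by xs => xs.length
decreasing_by simp

def count_good_prefixes_alt (t : Int) (test_cases : List (Int × List Int)) : List Int :=
  test_cases.map (fun case => pvSegments 0 0 0 (case.2.take (max case.1 0).toNat))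

-- ===== PRECONDITION & SPEC =====
-- A indexes a[i] for i in range(n): excludes exactly the cases with n > len(a), where A raises IndexError.
def Pre_count_good_prefixes (t : Int) (test_cases : List (Int × List Int)) : Prop :=
  ∀ case ∈ test_cases, case.1 ≤ (case.2.length : Int)
instance (t : Int) (test_cases : List (Int × List Int)) : Decidable (Pre_count_good_prefixes t test_cases) := by unfold Pre_count_good_prefixes; infer_instance

def pvWitness_count_good_prefixes : Int × (List (Int × List Int)) := (1, [(2, [1, 1])])

def Spec_count_good_prefixes (t : Int) (test_cases : List (Int × List Int)) (out : List Int) : Prop := out = count_good_prefixes_alt t test_cases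
instance (t : Int) (test_cases : List (Int × List Int)) (out : List Int) : Decidable (Spec_count_good_prefixes t test_cases out) := by unfold Spec_count_good_prefixes; infer_instance

-- ===== CLAIM (what is proved, stated in full; the proofs are below) =====
def Claim_equal_count_good_prefixes : Prop := ∀ (t : Int) (test_cases : List (Int × List Int)), Dom_count_good_prefixes t test_cases → Pre_count_good_prefixes t test_cases → Spec_count_good_prefixes t test_cases (count_good_prefixes t test_cases)

-- ===== LEMMAS AND PROOFS =====

-- proof-side running max with carry
def pvAccMax (m : Int) : List Int → List Int
  | [] => []
  | x :: xs => (max m x) :: pvAccMax (max m x) xs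

theorem pvAccAdd_length (s : Int) (u : List Int) : (pvAccAdd s u).length = u.length := by
  induction u generalizing s with
  | nil => rfl
  | cons x xs ih => simp [pvAccAdd, ih]

theorem pvAccAdd_append (u v : List Int) : ∀ s,
    pvAccAdd s (u ++ v) = pvAccAdd s u ++ pvAccAdd (s + u.sum) v := by
  induction u with
  | nil => intro s; simp [pvAccAdd]
  | cons x xs ih => intro s; simp [pvAccAdd, ih]; ring_nf

theorem pvAccMax_append (u v : List Int) : ∀ m,
    pvAccMax m (u ++ v) = pvAccMax m u ++ pvAccMax (u.foldl max m) v := by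
  induction u with
  | nil => intro m; simp [pvAccMax]
  | cons x xs ih => intro m; simp [pvAccMax, ih]

theorem pvAccMax_const (u : List Int) : ∀ m, (∀ y ∈ u, y ≤ m) →
    pvAccMax m u = List.replicate u.length m ∧ u.foldl max m = m := by
  induction u with
  | nil => intro m _; simp [pvAccMax]
  | cons x xs ih =>
    intro m h
    have hx : max m x = m := by have := h x (by simp); omega
    have := ih m (fun y hy => h y (by simp [hy]))
    simp [pvAccMax, hx, this.1, this.2, List.replicate_succ]

theorem pv_count_zip_replicate (l : List Int) (c : Int) :
    ((l.zip (List.replicate l.length c)).countP (fun pq => pq.1 == 2 * pq.2) : Int)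
      = l.count (2 * c) := by
  induction l with
  | nil => simp
  | cons x xs ih =>
    simp only [List.length_cons, List.replicate_succ, List.zip_cons_cons, List.countP_cons,
      List.count_cons, ih]
    by_cases h : x = 2 * c
    · simp only [h, BEq.rfl, if_true]
      push_cast
      omega
    · have h1 : (x == 2 * c) = false := by simp [h]
      simp only [h1, if_false, Bool.false_eq_true]
      push_cast
      omega

-- rest.drop (takeWhile p rest).length = dropWhile p rest
theorem pv_drop_takeWhile (p : Int → Bool) (l : List Int) :
    l.drop (l.takeWhile p).length = l.dropWhile p := by
  induction l with
  | nil => rfl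
  | cons x xs ih =>
    by_cases h : p x
    · simp [List.takeWhile_cons, List.dropWhile_cons, h, ih]
    · simp [List.takeWhile_cons, List.dropWhile_cons, h]

-- B's segment recursion equals counting p = 2q over zipped prefix tables
theorem pv_seg_eq_aux (N : Nat) : ∀ (xs : List Int), xs.length ≤ N → ∀ good s m,
    pvSegments good s m xs
      = good + (((pvAccAdd s xs).zip (pvAccMax m xs)).countP (fun pq => pq.1 == 2 * pq.2) : Int) := by
  induction N with
  | zero =>
    intro xs h good s m
    have hx : xs = [] := List.eq_nil_of_length_eq_zero (by omega)
    subst hx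
    rw [pvSegments]; simp [pvAccAdd, pvAccMax]
  | succ N ih =>
    intro xs h good s m
    cases xs with
    | nil => rw [pvSegments]; simp [pvAccAdd, pvAccMax]
    | cons x rest =>
      simp only [pvSegments]
      set m2 := max m x with hm2
      set tw := rest.takeWhile (fun y => decide (y ≤ m2)) with htw
      set dr := rest.dropWhile (fun y => decide (y ≤ m2)) with hdr
      have hdrop : rest.drop tw.length = dr := pv_drop_takeWhile _ _
      have hrest : tw ++ dr = rest := List.takeWhile_append_dropWhile
      have htwle : ∀ y ∈ tw, y ≤ m2 := by
        intro y hy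
        have := List.mem_takeWhile_imp (htw ▸ hy)
        simpa using this
      have hmax := pvAccMax_const tw m2 htwle
      have hxsplit : x :: rest = (x :: tw) ++ dr := by simp [hrest]
      have hdrlen : dr.length ≤ N := by
        have h1 : dr.length ≤ rest.length := by
          rw [hdr]; exact List.length_dropWhile_le _ _
        simp at h
        omega
      rw [hdrop, ih dr hdrlen]
      rw [add_assoc]
      congr 1
      conv_rhs => rw [hxsplit]
      rw [pvAccAdd_append, pvAccMax_append]
      have hmx : pvAccMax m (x :: tw) = List.replicate (pvAccAdd s (x :: tw)).length m2 := by
        rw [pvAccAdd_length]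
        simp [pvAccMax, ← hm2, hmax.1, List.replicate_succ]
      have hfold : (x :: tw).foldl max m = m2 := by
        simp only [List.foldl_cons, ← hm2]
        exact hmax.2
      rw [hmx, hfold,
          List.zip_append (by simp), List.countP_append]
      push_cast
      rw [pv_count_zip_replicate]

theorem pv_seg_eq (xs : List Int) (s m : Int) :
    pvSegments 0 s m xs
      = (((pvAccAdd s xs).zip (pvAccMax m xs)).countP (fun pq => pq.1 == 2 * pq.2) : Int) := by
  rw [pv_seg_eq_aux xs.length xs le_rfl 0 s m, zero_add]

-- A's fused loop over xs equals counting p = 2q over the zipped prefix tables with the same carries.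
theorem pv_loop_eq (xs : List Int) : ∀ (s m c : Int),
    (xs.foldl (fun (st : Int × Int × Int) x =>
        (st.1 + x, max st.2.1 x,
          st.2.2 + if st.1 + x - max st.2.1 x = max st.2.1 x then 1 else 0)) (s, m, c)).2.2
      = c + (((pvAccAdd s xs).zip (pvAccMax m xs)).countP (fun pq => pq.1 == 2 * pq.2) : Int) := by
  induction xs with
  | nil => intro s m c; simp [pvAccAdd, pvAccMax]
  | cons x xs ih =>
    intro s m c
    simp only [List.foldl_cons, pvAccAdd, pvAccMax, List.zip_cons_cons, List.countP_cons, ih]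
    by_cases h : s + x - max m x = max m x
    · have h2 : (s + x == 2 * max m x) = true := by simp; omega
      simp [h, h2]; ring
    · have h2 : (s + x == 2 * max m x) = false := by simp; omega
      simp [h, h2]

-- pyGetD agrees on a take-prefix
theorem pv_pyGetD_take (a : List Int) (k : Nat) (i : Int) (d : Int)
    (h0 : 0 ≤ i) (h1 : i < (k : Int)) (h2 : k ≤ a.length) :
    PySem.List.pyGetD (a.take k) i d = PySem.List.pyGetD a i d := by
  have hk : i.toNat < k := by omega
  have hlen : (a.take k).length = k := by simp; omega
  rw [PySem.List.pyGetD_eq_getElem (a.take k) d h0 (by rw [hlen]; exact_mod_cast h1),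
      PySem.List.pyGetD_eq_getElem a d h0 (by omega)]
  exact List.getElem_take

-- per-case equality
theorem pv_case_eq (n : Int) (a : List Int) (hn : n ≤ (a.length : Int)) :
    ((PySem.List.pyRange 0 n 1).foldl
      (fun (st : Int × Int × Int) i =>
        let x := PySem.List.pyGetD a i 0
        let s := st.1 + x
        let m := max st.2.1 x
        (s, m, st.2.2 + if s - m = m then 1 else 0)) (0, 0, 0)).2.2
    = pvSegments 0 0 0 (a.take (max n 0).toNat) := by
  by_cases hpos : n ≤ 0
  · have h1 : PySem.List.pyRange 0 n 1 = [] := PySem.List.pyRange_one_eq_nil hpos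
    have h2 : (max n 0).toNat = 0 := by omega
    rw [h1, h2]
    simp only [List.take_zero, List.foldl_nil]
    rw [pvSegments]
  · rw [not_le] at hpos
    set xs := a.take (max n 0).toNat with hxs
    have hlen : (xs.length : Int) = n := by
      rw [hxs]; simp; omega
    have hcongr : (PySem.List.pyRange 0 n 1).foldl
        (fun (st : Int × Int × Int) i =>
          let x := PySem.List.pyGetD a i 0
          let s := st.1 + x
          let m := max st.2.1 x
          (s, m, st.2.2 + if s - m = m then 1 else 0)) (0, 0, 0)
        = (PySem.List.pyRange 0 n 1).foldl
        (fun (st : Int × Int × Int) i =>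
          let x := PySem.List.pyGetD xs i 0
          let s := st.1 + x
          let m := max st.2.1 x
          (s, m, st.2.2 + if s - m = m then 1 else 0)) (0, 0, 0) := by
      refine PySem.List.foldl_congr_mem _ _ _ _ (fun st i hi => ?_)
      have := (PySem.List.mem_pyRange_one).1 hi
      rw [pv_pyGetD_take a (max n 0).toNat i 0 this.1 (by omega) (by omega)]
    rw [hcongr, ← hlen,
        PySem.List.foldl_pyRange_zero_pyGetD' xs 0
          (fun (st : Int × Int × Int) x =>
            (st.1 + x, max st.2.1 x,
              st.2.2 + if st.1 + x - max st.2.1 x = max st.2.1 x then 1 else 0)) (0, 0, 0)]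
    rw [pv_loop_eq xs 0 0 0, pv_seg_eq xs 0 0]
    simp

-- ===== VERDICT (by name: the statement is the Claim_ definition above) =====
theorem count_good_prefixes_spec : Claim_equal_count_good_prefixes := by
  intro t test_cases _ hpre
  unfold Spec_count_good_prefixes count_good_prefixes count_good_prefixes_alt
  rw [PySem.List.foldl_append_singleton_eq_map]
  simp only [List.nil_append]
  refine List.map_congr_left (fun case hc => ?_)
  exact pv_case_eq case.1 case.2 (hpre case hc)
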